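-- pv_equiv track=rewrite | github.com/ToyotaInfoTech/ecmper | tools/c4bmv2.py | _expand_nh
-- ===== SOURCE A (Python) =====
-- def _expand_nh(nh):
--     # nh is self.cur_nh or self.prv_nh
--
--     """
--     The number of Nexthop entries for a LPM route must be
--     power of 2. So, this function expands Nexthop entries
--     to fit the minimum power of 2 that is equal to or
--     grater than the number of Nexthop entries.
--
--     XXX: this can be a consistent hashing
--     """
--
--     n = len(nh)
--     if n == 0:
--         # len 0 means this LPMEntry has only prv or cur nh table.
--         return nh
--
--     m = 1
--     if n > 1 :
--         # this is ECMP route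
--         while m < n:
--             m <<= 1
--         m <<= 2
--
--     # Ok, we need 'm' nexthop entries
--     expanded_nh = []
--     for x in range(m):
--         expanded_nh.append(nh[x % n])
--     return expanded_nh
-- ===== SOURCE B (Python) =====
-- def _expand_nh(nh):
--     # Loop-free: closed-form target size via bit_length, then list replication
--     # plus a remainder prefix instead of the modulo-indexed append loop.
--     n = len(nh)
--     if n == 0:
--         return nh
--     if n == 1:
--         return nh[:1]
--     m = (1 << (n - 1).bit_length()) << 2
--     q, r = divmod(m, n)
--     return nh * q + nh[:r]
-- ===== Notes on version B (the rewrite author's own statement) =====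
-- stated objective: simpler
-- what changed: Replaces the doubling while-loop by a closed-form (n-1).bit_length() size and the modulo-indexed append loop by list replication plus a remainder-prefix slice, making the function loop-free.
import Mathlib
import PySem

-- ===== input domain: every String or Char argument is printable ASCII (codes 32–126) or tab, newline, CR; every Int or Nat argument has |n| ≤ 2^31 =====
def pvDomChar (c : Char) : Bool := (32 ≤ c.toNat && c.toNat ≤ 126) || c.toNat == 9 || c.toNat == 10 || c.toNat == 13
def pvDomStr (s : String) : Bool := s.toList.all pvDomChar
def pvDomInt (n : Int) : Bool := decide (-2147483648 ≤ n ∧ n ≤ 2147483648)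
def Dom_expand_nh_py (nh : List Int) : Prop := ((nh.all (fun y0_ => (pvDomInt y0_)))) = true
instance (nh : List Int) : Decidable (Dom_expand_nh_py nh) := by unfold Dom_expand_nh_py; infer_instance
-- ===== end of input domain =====

-- B replaces A's doubling while-loop by a closed-form bit_length size and A's
-- modulo-indexed append loop by list replication plus a remainder prefix (objective: simpler).

-- ===== PORT A =====
-- 'while m < n: m <<= 1'. The '0 < m' conjunct only totalizes the recursion
-- (A always enters with m = 1 > 0, where it is vacuously true).
def growA (m n : Nat) : Nat :=
  if 0 < m ∧ m < n then growA (2 * m) n else m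
termination_by n - m
decreasing_by omega

-- for x in range(m): expanded_nh.append(nh[x % n]); x % n is exact here since
-- 0 ≤ x % n < n = len(nh), so Python's nh[x % n] is exactly nh.getD (x % n) 0.
def expand_nh_py (nh : List Int) : List Int :=
  let n := nh.length
  if n = 0 then nh
  else
    let m := 1
    let m := if n > 1 then (growA m n) <<< 2 else m
    (List.range m).foldl (fun acc x => acc ++ [nh.getD (x % n) 0]) []

-- ===== PORT B =====
-- (n-1).bit_length() → PySem.Int.bitLength; nh * q + nh[:r] → flatten/take.
def expand_nh_py_alt (nh : List Int) : List Int :=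
  let n := nh.length
  if n = 0 then nh
  else if n = 1 then nh.take 1
  else
    let m := (1 <<< PySem.Int.bitLength ((n : Int) - 1)) <<< 2
    let q := m / n
    let r := m % n
    (List.replicate q nh).flatten ++ nh.take r

-- ===== PRECONDITION & SPEC =====
def Spec_expand_nh_py (nh : List Int) (out : List Int) : Prop := out = expand_nh_py_alt nh
instance (nh : List Int) (out : List Int) : Decidable (Spec_expand_nh_py nh out) := by unfold Spec_expand_nh_py; infer_instance

-- ===== CLAIM (what is proved, stated in full; the proofs are below) =====
def Claim_equal_expand_nh_py : Prop := ∀ (nh : List Int), Dom_expand_nh_py nh → Spec_expand_nh_py nh (expand_nh_py nh)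

-- ===== LEMMAS AND PROOFS =====

-- A's doubling loop from 2^j reaches 2^K, for K the exponent of the least power
-- of two that is ≥ n (characterised abstractly by hK / hmin).
theorem growA_pow (n K : Nat) (hK : n ≤ 2 ^ K) (hmin : ∀ j, n ≤ 2 ^ j → K ≤ j) :
    ∀ j, growA (2 ^ j) n = 2 ^ max j K := by
  have main : ∀ d j, K - j ≤ d → growA (2 ^ j) n = 2 ^ max j K := by
    intro d
    induction d with
    | zero =>
      intro j hj
      have hKj : K ≤ j := by omega
      have hn : n ≤ 2 ^ j := le_trans hK (Nat.pow_le_pow_right (by norm_num) hKj)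
      rw [growA]
      rw [if_neg (by omega), Nat.max_eq_left hKj]
    | succ d ih =>
      intro j hj
      by_cases h : 2 ^ j < n
      · have hjK : j < K := by
          by_contra hc
          have : n ≤ 2 ^ j := le_trans hK (Nat.pow_le_pow_right (by norm_num) (by omega))
          omega
        rw [growA]
        rw [if_pos ⟨Nat.two_pow_pos j, h⟩]
        have h2 : 2 * 2 ^ j = 2 ^ (j + 1) := by ring
        rw [h2, ih (j + 1) (by omega)]
        congr 1
        omega
      · have hKj : K ≤ j := hmin j (by omega)
        rw [growA]
        rw [if_neg (by omega), Nat.max_eq_left hKj]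
  exact fun j => main (K + 1) j (by omega)

-- the modulo-indexed map over range m is q full copies of nh plus the first r entries
theorem map_mod_eq_rep_take (nh : List Int) (hn : nh ≠ []) : ∀ m,
    (List.range m).map (fun x => nh.getD (x % nh.length) 0) =
      (List.replicate (m / nh.length) nh).flatten ++ nh.take (m % nh.length) := by
  set n := nh.length with hnlen
  have hn0 : 0 < n := by rw [hnlen]; exact List.length_pos_iff.mpr hn
  clear_value n
  intro m
  induction m with
  | zero => simp
  | succ m ih =>
    rw [List.range_succ, List.map_append, ih]
    have hmod : m % n < n := Nat.mod_lt _ hn0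
    by_cases hc : m % n + 1 = n
    · have hdm := Nat.div_add_mod m n
      have hmul : n * (m / n + 1) = n * (m / n) + n := by ring
      have h1 : m + 1 = n * (m / n + 1) := by omega
      have hdiv : (m + 1) / n = m / n + 1 := by
        rw [h1, Nat.mul_div_cancel_left _ hn0]
      have hmd : (m + 1) % n = 0 := by
        rw [h1]; exact Nat.mul_mod_right n _
      rw [hdiv, hmd]
      have htake : nh.take (m % n) ++ [nh.getD (m % n) 0] = nh := by
        have hlt : m % n < nh.length := by omega
        have : nh.take (m % n + 1) = nh.take (m % n) ++ [nh.getD (m % n) 0] := by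
          rw [List.take_add_one]
          congr 1
          simp [List.getElem?_eq_getElem hlt]
        rw [← this, hc]
        simp [hnlen]
      rw [List.replicate_succ', List.flatten_append]
      simp only [List.flatten_cons, List.flatten_nil, List.append_nil, List.take_zero,
        List.append_nil, List.map_cons, List.map_nil, List.append_assoc]
      rw [htake]
    · have hdm := Nat.div_add_mod m n
      have h1 : m + 1 = n * (m / n) + (m % n + 1) := by omega
      have hdiv : (m + 1) / n = m / n := by
        rw [h1, Nat.mul_add_div hn0, Nat.div_eq_of_lt (show m % n + 1 < n by omega)]
        omega
      have hmd : (m + 1) % n = m % n + 1 := by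
        rw [h1, Nat.mul_add_mod, Nat.mod_eq_of_lt (by omega)]
      rw [hdiv, hmd]
      have hlt : m % n < nh.length := by omega
      rw [List.take_add_one, List.append_assoc]
      congr 2
      simp [List.getElem?_eq_getElem hlt]

-- growA 1 n is 2 ^ bit_length (n - 1) for n ≥ 2
theorem growA_bitLength (n : Nat) (hn : 2 ≤ n) :
    growA 1 n = 2 ^ PySem.Int.bitLength ((n : Int) - 1) := by
  set K := PySem.Int.bitLength ((n : Int) - 1) with hKdef
  have habs : ((n : Int) - 1).natAbs = n - 1 := by omega
  have hne : ((n : Int) - 1) ≠ 0 := by omega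
  have hup : n - 1 < 2 ^ K := by
    have := PySem.Int.lt_two_pow_bitLength ((n : Int) - 1)
    rwa [habs] at this
  have hlow : 2 ^ (K - 1) ≤ n - 1 := by
    have := PySem.Int.two_pow_bitLength_le ((n : Int) - 1) hne
    rwa [habs] at this
  have hK1 : 1 ≤ K := by
    by_contra hc
    have hK0 : K = 0 := by omega
    rw [hK0] at hup
    simp at hup
    omega
  have hK : n ≤ 2 ^ K := by omega
  have hmin : ∀ j, n ≤ 2 ^ j → K ≤ j := by
    intro j hj
    by_contra hc
    have hjK : j ≤ K - 1 := by omega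
    have : 2 ^ j ≤ 2 ^ (K - 1) := Nat.pow_le_pow_right (by norm_num) hjK
    omega
  have h := growA_pow n K hK hmin 0
  simpa using h

-- ===== VERDICT (by name: the statement is the Claim_ definition above) =====
theorem expand_nh_py_spec : Claim_equal_expand_nh_py := by
  intro nh _
  unfold Spec_expand_nh_py expand_nh_py expand_nh_py_alt
  match nh with
  | [] => simp
  | [a] =>
    simp [List.range_succ]
  | a :: b :: t =>
    set nh := a :: b :: t with hnh
    have hn2 : 2 ≤ nh.length := by simp [hnh]
    have hne : nh ≠ [] := by simp [hnh]
    simp only [if_neg (by omega : ¬ nh.length = 0), if_neg (by omega : ¬ nh.length = 1),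
      if_pos (by omega : nh.length > 1)]
    rw [PySem.List.foldl_append_singleton_eq_map]
    have hm : growA 1 nh.length <<< 2 =
        (1 <<< PySem.Int.bitLength ((nh.length : Int) - 1)) <<< 2 := by
      rw [growA_bitLength nh.length hn2, Nat.one_shiftLeft]
    rw [hm]
    simpa using map_mod_eq_rep_take nh hne ((1 <<< PySem.Int.bitLength ((nh.length : Int) - 1)) <<< 2)
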